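-- pv_equiv track=rewrite | github.com/AyanamiReix/Python- | 函数返回值以及嵌套调用.py | jishu
-- ===== SOURCE A (Python) =====
-- def jishu(con):
--     listA=[]
--     index=1
--     for i in con:
--         if index%2==1:
--             listA.append(i)
--             pass
--         index+=1
--         pass
--     return listA
-- ===== SOURCE B (Python) =====
-- def jishu(con):
--     return list(con)[::2]
-- ===== Notes on version B (the rewrite author's own statement) =====
-- stated objective: idiomatic
-- what changed: Replaces the manual 1-based position counter loop with a single stride-2 slice list(con)[::2]; no counter, branch or append is maintained.
import Mathlib
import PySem

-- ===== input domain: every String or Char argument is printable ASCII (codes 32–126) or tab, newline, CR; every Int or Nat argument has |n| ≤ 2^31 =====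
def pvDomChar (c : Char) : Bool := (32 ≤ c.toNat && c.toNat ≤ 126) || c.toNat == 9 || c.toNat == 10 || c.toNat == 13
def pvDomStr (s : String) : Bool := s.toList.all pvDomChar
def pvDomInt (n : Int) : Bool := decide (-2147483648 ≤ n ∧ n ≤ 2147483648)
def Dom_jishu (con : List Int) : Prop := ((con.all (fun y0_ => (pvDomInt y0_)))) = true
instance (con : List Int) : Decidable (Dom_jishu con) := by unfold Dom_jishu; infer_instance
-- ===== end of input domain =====

-- B replaces A's manual 1-based position counter and conditional append with a single stride-2 slice (idiomatic).

-- ===== PORT A =====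
-- literal transliteration of A's counter loop: state = (listA, index)
def jishu (con : List Int) : List Int :=
  (con.foldl
    (fun (st : List Int × Int) i =>
      (if st.2 % 2 == 1 then st.1 ++ [i] else st.1, st.2 + 1))
    ([], 1)).1

-- ===== PORT B =====
-- literal transliteration of Source B: return list(con)[::2]  (step-2 slice; step ≠ 0 so slice? is some)
def jishu_alt (con : List Int) : List Int :=
  (PySem.List.slice? con none none 2).getD []

-- ===== PRECONDITION & SPEC =====
def Spec_jishu (con : List Int) (out : List Int) : Prop := out = jishu_alt con
instance (con : List Int) (out : List Int) : Decidable (Spec_jishu con out) := by unfold Spec_jishu; infer_instance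

-- ===== CLAIM (what is proved, stated in full; the proofs are below) =====
def Claim_equal_jishu : Prop := ∀ (con : List Int), Dom_jishu con → Spec_jishu con (jishu con)

-- ===== LEMMAS AND PROOFS =====

-- elements at even 0-based positions (odd 1-based positions)
def pick : List Int → List Int
  | [] => []
  | [x] => [x]
  | x :: _ :: xs => x :: pick xs

theorem pick_cons (x : Int) (xs : List Int) : pick (x :: xs) = x :: pick xs.tail := by
  cases xs <;> simp [pick]

theorem jishu_foldl (l : List Int) :
    ∀ (acc : List Int) (idx : Int),
      (l.foldl
        (fun (st : List Int × Int) i =>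
          (if st.2 % 2 == 1 then st.1 ++ [i] else st.1, st.2 + 1))
        (acc, idx)).1
      = acc ++ (if idx % 2 = 1 then pick l else pick l.tail) := by
  induction l with
  | nil => intro acc idx; simp [List.foldl, pick]
  | cons x xs ih =>
    intro acc idx
    simp only [beq_iff_eq] at ih ⊢
    by_cases h : idx % 2 = 1
    · have h2 : ¬ (idx + 1) % 2 = 1 := by omega
      simp only [List.foldl, if_pos h]
      rw [ih (acc ++ [x]) (idx + 1)]
      simp [h2, pick_cons]
    · have h2 : (idx + 1) % 2 = 1 := by omega
      simp only [List.foldl, if_neg h]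
      rw [ih acc (idx + 1)]
      simp [h2]

theorem jishu_eq_pick (con : List Int) : jishu con = pick con := by
  unfold jishu
  rw [jishu_foldl con [] 1]
  norm_num

theorem filt_pick (l : List Int) :
    List.filterMap (fun k => l[2 * k]?) (List.range ((l.length + 1) / 2)) = pick l := by
  induction l using pick.induct with
  | case1 => simp [pick]
  | case2 x => simp [pick]
  | case3 x y xs ih =>
    have hc : (((x :: y :: xs).length + 1) / 2) = (xs.length + 1) / 2 + 1 := by
      simp only [List.length_cons]; omega
    rw [hc, List.range_succ_eq_map, List.filterMap_cons, List.filterMap_map]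
    have hf : ((fun k => (x :: y :: xs)[2 * k]?) ∘ Nat.succ)
        = (fun k => xs[2 * k]?) := by
      funext k
      have : 2 * Nat.succ k = 2 * k + 1 + 1 := by omega
      simp [Function.comp, this]
    rw [hf, ih]
    simp [pick]

theorem jishu_alt_eq_pick (con : List Int) : jishu_alt con = pick con := by
  unfold jishu_alt
  simp only [PySem.List.slice?, PySem.List.sliceIndices]
  norm_num
  have hfun : (fun (x : Nat) => con[(2 * (x : Int)).toNat]?)
      = (fun (x : Nat) => con[2 * x]?) := by
    funext x
    have h2x : ((2 * (x : Int)).toNat) = 2 * x := by omega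
    rw [h2x]
  have hcnt : (if 0 < con.length then (((con.length : Int) + 2 - 1) / 2).toNat else 0)
      = (con.length + 1) / 2 := by
    split <;> omega
  rw [hfun, hcnt, filt_pick]

-- ===== VERDICT (by name: the statement is the Claim_ definition above) =====
theorem jishu_spec : Claim_equal_jishu := by
  intro con _
  unfold Spec_jishu
  rw [jishu_eq_pick, jishu_alt_eq_pick]
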